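-- pv_equiv track=rewrite | github.com/pypi-data/pypi-mirror-395 | packages/zetaq-edu-diff-engine/zetaq_edu_diff_engine-0.1.0.tar.gz/zetaq_edu_diff_engine-0.1.0/src/edu_diff_engine/engine.py | _question_distribution
-- ===== SOURCE A (Python) =====
-- from typing import List, Optional
--
-- def _question_distribution(total: int, num_segments: int) -> List[int]:
--     """
--     Split 'total' questions as evenly as possible across segments.
--     Example: total=10, num_segments=3 -> [4,3,3] or [3,3,4] etc.
--     """
--     base = total // num_segments
--     rem = total % num_segments
--     counts = []
--     for i in range(num_segments):
--         extra = 1 if i < rem else 0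
--         counts.append(base + extra)
--     return counts
-- ===== SOURCE B (Python) =====
-- def _question_distribution(total: int, num_segments: int):
--     # Peel off one segment at a time: the next segment always gets the
--     # ceiling of the even share of what is still left, then both the
--     # remaining total and the remaining segment count shrink.
--     # Front-loads the remainder exactly like A.
--     counts = []
--     left, k = total, num_segments
--     while k > 0:
--         head = -((-left) // k)
--         counts.append(head)
--         left -= head
--         k -= 1
--     return counts
-- ===== Notes on version B (the rewrite author's own statement) =====
-- stated objective: alternative
-- what changed: Replaces the up-front base/remainder split and index loop by a recursion that peels one segment at a time, giving the head the ceiling of the current even share and recursing on the reduced total and segment count; Pre_ excludes only num_segments == 0, where A raises ZeroDivisionError and B naturally returns [].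
import Mathlib
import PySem

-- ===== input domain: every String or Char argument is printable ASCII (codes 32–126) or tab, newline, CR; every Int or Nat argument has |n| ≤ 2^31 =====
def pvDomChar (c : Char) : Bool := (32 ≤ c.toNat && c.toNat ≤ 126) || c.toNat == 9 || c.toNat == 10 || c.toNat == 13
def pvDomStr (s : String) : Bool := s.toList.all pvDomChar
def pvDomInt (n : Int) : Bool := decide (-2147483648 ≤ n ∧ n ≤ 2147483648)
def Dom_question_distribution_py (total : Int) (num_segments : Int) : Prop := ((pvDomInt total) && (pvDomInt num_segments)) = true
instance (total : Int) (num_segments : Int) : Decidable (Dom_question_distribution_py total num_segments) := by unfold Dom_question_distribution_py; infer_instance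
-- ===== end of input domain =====

-- B peels one segment at a time by ceiling division instead of A's base/remainder split; objective: alternative.

-- ===== PORT A =====
def question_distribution_py (total : Int) (num_segments : Int) : List Int :=
  let base := PySem.Int.floordiv total num_segments
  let rem := PySem.Int.mod total num_segments
  (PySem.List.pyRange 0 num_segments 1).foldl
    (fun counts i =>
      let extra : Int := if i < rem then 1 else 0
      counts ++ [base + extra]) []

-- ===== PORT B =====
-- B's while loop counts k down from num_segments to 0; ported as structural
-- recursion on the remaining segment count k (0 iterations when num_segments <= 0,
-- exactly like the Python loop).
def qd_peel (total : Int) : Nat → List Int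
  | 0 => []
  | k + 1 =>
    let head := -(PySem.Int.floordiv (-total) (k + 1 : Nat))
    head :: qd_peel (total - head) k

def question_distribution_py_alt (total : Int) (num_segments : Int) : List Int :=
  qd_peel total num_segments.toNat

-- ===== PRECONDITION & SPEC =====
-- Pre_ excludes num_segments = 0, on which Python A raises ZeroDivisionError.
def Pre_question_distribution_py (total : Int) (num_segments : Int) : Prop := num_segments ≠ 0
instance (total : Int) (num_segments : Int) : Decidable (Pre_question_distribution_py total num_segments) := by unfold Pre_question_distribution_py; infer_instance
def pvWitness_question_distribution_py : Int × Int := (10, 3)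

def Spec_question_distribution_py (total : Int) (num_segments : Int) (out : List Int) : Prop := out = question_distribution_py_alt total num_segments
instance (total : Int) (num_segments : Int) (out : List Int) : Decidable (Spec_question_distribution_py total num_segments out) := by unfold Spec_question_distribution_py; infer_instance

-- ===== CLAIM (what is proved, stated in full; the proofs are below) =====
def Claim_equal_question_distribution_py : Prop := ∀ (total : Int) (num_segments : Int), Dom_question_distribution_py total num_segments → Pre_question_distribution_py total num_segments → Spec_question_distribution_py total num_segments (question_distribution_py total num_segments)

-- ===== LEMMAS AND PROOFS =====

-- A's append-accumulating fold is the map of its step function.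
theorem foldl_append_singleton {α β : Type} (f : α → β) (xs : List α) (acc : List β) :
    xs.foldl (fun counts i => counts ++ [f i]) acc = acc ++ xs.map f := by
  induction xs generalizing acc with
  | nil => simp
  | cons x xs ih => simp [List.foldl, ih, List.append_assoc]

-- B's peeling recursion computes exactly A's base+extra list, for any positive count.
theorem qd_peel_eq (k : Nat) (total : Int) :
    qd_peel total k
      = (PySem.List.pyRange 0 (k : Int) 1).map
          (fun i => PySem.Int.floordiv total k + (if i < PySem.Int.mod total k then 1 else 0)) := by
  induction k generalizing total with
  | zero => simp [qd_peel, PySem.List.pyRange_one_eq_nil]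
  | succ m ih =>
    have hk : (0 : Int) < (m + 1 : Nat) := by positivity
    have hq := PySem.Int.floordiv_mul_add_mod total ((m + 1 : Nat) : Int)
    have hr0 : 0 ≤ PySem.Int.mod total ((m + 1 : Nat) : Int) := PySem.Int.mod_nonneg total hk
    have hrn : PySem.Int.mod total ((m + 1 : Nat) : Int) < ((m + 1 : Nat) : Int) :=
      PySem.Int.mod_lt total hk
    set base := PySem.Int.floordiv total ((m + 1 : Nat) : Int) with hbase
    set rem := PySem.Int.mod total ((m + 1 : Nat) : Int) with hrem
    set e : Int := if 0 < rem then 1 else 0 with he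
    -- the head is base + e
    have hhead : -(PySem.Int.floordiv (-total) ((m + 1 : Nat) : Int)) = base + e := by
      rw [PySem.Int.neg_floordiv_neg_eq_iff_of_pos (hb := hk)]
      constructor <;> (simp only [he]; split_ifs <;> nlinarith)
    rcases Nat.eq_zero_or_pos m with hm | hm
    · subst hm
      have hr : rem = 0 := by omega
      have hb : base = total := by
        rw [hbase, PySem.Int.floordiv_eq_iff_of_pos (hb := hk)]
        push_cast; omega
      have h01 : PySem.List.pyRange (0 : Int) 1 1 = [0] := by decide
      simp [qd_peel, hr, hb, h01]
    · -- recursive case: the remaining total splits as base per segment with remainder rem - e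
      have hmpos : (0 : Int) < (m : Nat) := by exact_mod_cast hm
      have he01 : e = 0 ∧ rem = 0 ∨ e = 1 ∧ 0 < rem := by
        simp only [he]; split_ifs with h <;> omega
      have hdiv : PySem.Int.floordiv (total - (base + e)) ((m : Nat) : Int) = base := by
        rw [PySem.Int.floordiv_eq_iff_of_pos (hb := hmpos)]
        rcases he01 with ⟨h1, h2⟩ | ⟨h1, h2⟩ <;>
          (constructor <;> (push_cast at hq hrn ⊢; nlinarith))
      have hmod : PySem.Int.mod (total - (base + e)) ((m : Nat) : Int) = rem - e := by
        have h := PySem.Int.floordiv_mul_add_mod (total - (base + e)) ((m : Nat) : Int)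
        rw [hdiv] at h
        push_cast at hq h ⊢
        linarith
      have hcons : PySem.List.pyRange 0 ((m + 1 : Nat) : Int) 1
          = 0 :: PySem.List.pyRange 1 ((m + 1 : Nat) : Int) 1 := by
        exact PySem.List.pyRange_one_cons (by positivity)
      have hshift : PySem.List.pyRange 1 ((m + 1 : Nat) : Int) 1
          = (PySem.List.pyRange 0 ((m : Nat) : Int) 1).map (fun i => 1 + i) := by
        rw [PySem.List.pyRange_one, PySem.List.pyRange_one]
        simp [List.map_map, Function.comp_def]
      simp only [qd_peel, hhead, ih, hdiv, hmod, hcons, hshift, List.map_cons, List.map_map]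
      congr 1
      apply List.map_congr_left
      intro i hi
      rw [PySem.List.mem_pyRange_one] at hi
      simp only [Function.comp_def]
      congr 1
      rcases he01 with ⟨h1, h2⟩ | ⟨h1, h2⟩ <;> (split_ifs <;> omega)

-- ===== VERDICT =====
theorem question_distribution_py_spec : Claim_equal_question_distribution_py := by
  unfold Claim_equal_question_distribution_py
  intro total n _ hn
  unfold Spec_question_distribution_py question_distribution_py question_distribution_py_alt
  rw [foldl_append_singleton]
  simp only [List.nil_append]
  rcases lt_or_gt_of_ne hn with h | h
  · rw [PySem.List.pyRange_one_eq_nil (by omega)]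
    simp [Int.toNat_of_nonpos (le_of_lt h), qd_peel]
  · have hk : ((n.toNat : Nat) : Int) = n := Int.toNat_of_nonneg (le_of_lt h)
    rw [qd_peel_eq, hk]
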